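-- pv_equiv track=rewrite | github.com/HamzaBandukara/FRABisim | To_Delete/RA_Partition_Refinement_WNone.py | knuth_L_algorithm
-- ===== SOURCE A (Python) =====
-- def knuth_L_algorithm(seq):
--     if len(seq) == 0:
--         return [tuple(seq)]
--     a = sorted(seq)
--     limit = len(a) // 2
--     r = []
--     while True:
--         ret = tuple(a[:limit])
--         if ret not in r:
--             r.append(tuple(ret))
--         # k = limit - 1
--         k = len(a) - 2
--         while k > -1:
--             if a[k] < a[k + 1]:
--                 break
--             k -= 1
--         if k < 0:
--             return r
--         i = len(a) - 1
--         while i > k: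
--             if a[k] < a[i]:
--                 break
--             i -= 1
--         if i == k:
--             raise ValueError
--         a[k], a[i] = a[i], a[k]
--         rev = [a[x] for x in range(len(a) - 1, k, -1)]
--         index = 0
--         for x in range(k + 1, len(a)):
--             a[x] = rev[index]
--             index += 1
-- ===== SOURCE B (Python) =====
-- def knuth_L_algorithm(seq):
--     # Directly enumerate the distinct length-(n//2) arrangements of the sorted
--     # multiset in lexicographic order, instead of walking all n! permutations.
--     a = sorted(seq)
--
--     def gen(pool, k):
--         # pool is sorted; return all distinct k-length arrangements, lex order
--         if k == 0:
--             return [()]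
--         out = []
--         pre = []
--         rest = pool
--         while rest:
--             x = rest[0]
--             rest = rest[1:]
--             for t in gen(pre + rest, k - 1):
--                 out.append((x,) + t)
--             pre.append(x)
--             while rest and rest[0] == x:
--                 pre.append(rest[0])
--                 rest = rest[1:]
--         return out
--
--     return gen(a, len(a) // 2)
-- ===== Notes on version B (the rewrite author's own statement) =====
-- stated objective: faster
-- what changed: A walks all n! permutations with Knuth's next-permutation loop and dedups the n//2-prefixes by a linear membership scan; B recursively enumerates only the distinct length-(n//2) arrangements of the sorted multiset directly in lexicographic order, skipping duplicate choices at each position.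
import Mathlib
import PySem

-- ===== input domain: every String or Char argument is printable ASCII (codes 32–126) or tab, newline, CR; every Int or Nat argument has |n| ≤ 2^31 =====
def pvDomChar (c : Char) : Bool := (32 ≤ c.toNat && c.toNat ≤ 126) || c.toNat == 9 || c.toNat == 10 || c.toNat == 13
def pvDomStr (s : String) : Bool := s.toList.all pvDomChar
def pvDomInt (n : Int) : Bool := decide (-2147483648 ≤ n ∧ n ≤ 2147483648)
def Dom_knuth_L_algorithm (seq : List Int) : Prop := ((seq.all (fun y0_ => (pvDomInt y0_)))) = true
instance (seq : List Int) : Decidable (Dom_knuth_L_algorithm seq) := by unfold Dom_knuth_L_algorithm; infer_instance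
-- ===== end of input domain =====

-- B replaces A's walk over all n! permutations (Knuth next-permutation + membership dedup of
-- prefixes) by a direct recursive lexicographic enumeration of the distinct n//2-length
-- arrangements of the sorted multiset; objective: faster.


-- ===== PORT A =====
-- inner `while k > -1` scan: index kept as k+1 in Nat (argument 0 plays Python's k = -1)
def pvFindKAux (a : List Int) : Nat → Option Nat
  | 0 => none
  | k+1 => if a.getD k 0 < a.getD (k+1) 0 then some k else pvFindKAux a k

def pvFindK (a : List Int) : Option Nat := pvFindKAux a (a.length - 1)

-- inner `while i > k` scan: i = k + d + 1, d counts down; d = 0 is Python's i == k case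
def pvFindIAux (a : List Int) (k : Nat) : Nat → Nat
  | 0 => k
  | d+1 => if a.getD k 0 < a.getD (k+d+1) 0 then k+d+1 else pvFindIAux a k d

def pvFindI (a : List Int) (k : Nat) : Nat := pvFindIAux a k (a.length - 1 - k)

-- one body of A's `while True`: swap a[k],a[i] and reverse the suffix after k
def pvStep (a : List Int) : Option (List Int) :=
  match pvFindK a with
  | none => none
  | some k =>
    let i := pvFindI a k
    let ak := a.getD k 0
    let ai := a.getD i 0
    let a1 := (a.set k ai).set i ak
    some (a1.take (k+1) ++ (a1.drop (k+1)).reverse)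

-- A's `while True` loop; the fuel only makes it total (n!+1 is enough, proved below)
def pvLoop : Nat → Nat → List Int → List (List Int) → List (List Int)
  | 0, _, _, r => r
  | f+1, limit, a, r =>
    let ret := a.take limit
    let r' := if ret ∈ r then r else r ++ [ret]
    match pvStep a with
    | none => r'
    | some b => pvLoop f limit b r'

def knuth_L_algorithm (seq : List Int) : List (List Int) :=
  if seq.length = 0 then [[]]
  else
    let a := PySem.List.sorted seq (fun x => x) false
    -- len(a)//2 on a nonnegative length is exactly Nat division
    pvLoop (Nat.factorial a.length + 1) (a.length / 2) a []

-- ===== PORT B =====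
-- Source B's inner while loop over (pre, rest); the trailing inner while advances past duplicates
def pvGenGo (f : List Int → List (List Int)) : List Int → List Int → List (List Int)
  | _, [] => []
  | pre, x :: rest =>
      ((f (pre ++ rest)).map (fun t => x :: t)) ++
      pvGenGo f (pre ++ x :: rest.takeWhile (fun y => y == x)) (rest.dropWhile (fun y => y == x))
  termination_by _ r => r.length
  decreasing_by simpa using Nat.lt_succ_of_le (List.length_dropWhile_le _ _)

-- Source B's gen(pool, k)
def pvGen : Nat → List Int → List (List Int)
  | 0, _ => [[]]
  | k+1, pool => pvGenGo (pvGen k) [] pool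

def knuth_L_algorithm_alt (seq : List Int) : List (List Int) :=
  let a := PySem.List.sorted seq (fun x => x) false
  pvGen (a.length / 2) a

-- ===== PRECONDITION & SPEC =====
def Spec_knuth_L_algorithm (seq : List Int) (out : List (List Int)) : Prop := out = knuth_L_algorithm_alt seq
instance (seq : List Int) (out : List (List Int)) : Decidable (Spec_knuth_L_algorithm seq out) := by unfold Spec_knuth_L_algorithm; infer_instance

-- ===== CLAIM (what is proved, stated in full; the proofs are below) =====
def Claim_equal_knuth_L_algorithm : Prop := ∀ (seq : List Int), Dom_knuth_L_algorithm seq → Spec_knuth_L_algorithm seq (knuth_L_algorithm seq)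

-- ===== LEMMAS AND PROOFS =====

-- the dedup-append of A's loop
def pvIns (r : List (List Int)) (p : List Int) : List (List Int) := if p ∈ r then r else r ++ [p]

-- distinct values of a sorted list, in increasing order
def pvGps : List Int → List Int
  | [] => []
  | x :: t => x :: pvGps (t.filter (fun y => decide (x < y)))
  termination_by l => l.length
  decreasing_by
    refine Nat.lt_succ_of_le ?_
    calc ((t.attach.filter (fun y => decide (x < y.1))).unattach).length
        ≤ t.attach.length := by
          rw [List.length_unattach]; exact List.length_filter_le _ _
      _ = t.length := List.length_attach

theorem pvGps_nil : pvGps [] = [] := by rw [pvGps]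

theorem pvGps_cons (x : Int) (t : List Int) :
    pvGps (x :: t) = x :: pvGps (t.filter (fun y => decide (x < y))) := by rw [pvGps]

theorem mem_pvGps : ∀ (n : Nat) (l : List Int), l.length ≤ n → ∀ v ∈ pvGps l, v ∈ l := by
  intro n
  induction n with
  | zero =>
    intro l hl v hv
    have : l = [] := List.length_eq_zero_iff.mp (Nat.le_zero.mp hl)
    subst this; rw [pvGps_nil] at hv; simp at hv
  | succ n ih =>
    intro l hl v hv
    match l with
    | [] => rw [pvGps_nil] at hv; simp at hv
    | x :: t =>
      rw [pvGps_cons] at hv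
      rcases List.mem_cons.mp hv with h | h
      · simp [h]
      · have hlen : (t.filter (fun y => decide (x < y))).length ≤ n := by
          have := List.length_filter_le (fun y => decide (x < y)) t
          simp at hl; omega
        have := ih _ hlen v h
        exact List.mem_cons_of_mem _ (List.mem_of_mem_filter this)

theorem pvGps_pairwise_lt : ∀ (n : Nat) (l : List Int), l.length ≤ n →
    (pvGps l).Pairwise (· < ·) := by
  intro n
  induction n with
  | zero =>
    intro l hl
    have : l = [] := List.length_eq_zero_iff.mp (Nat.le_zero.mp hl)
    subst this; rw [pvGps_nil]; simp
  | succ n ih =>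
    intro l hl
    match l with
    | [] => rw [pvGps_nil]; simp
    | x :: t =>
      rw [pvGps_cons]
      have hlen : (t.filter (fun y => decide (x < y))).length ≤ n := by
        have := List.length_filter_le (fun y => decide (x < y)) t
        simp at hl; omega
      refine List.pairwise_cons.mpr ⟨?_, ih _ hlen⟩
      intro v hv
      have hvmem := mem_pvGps _ _ hlen v hv
      have := List.of_mem_filter hvmem
      simpa using this

-- all distinct permutations of the multiset of a sorted list, in lexicographic order
def pvLexPerms : List Int → List (List Int)
  | [] => [[]]
  | x :: t =>
      (pvGps (x :: t)).attach.flatMap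
        (fun v => (pvLexPerms ((x :: t).erase v.1)).map (fun p => v.1 :: p))
  termination_by l => l.length
  decreasing_by
    have hv : v.1 ∈ x :: t := mem_pvGps (x :: t).length (x :: t) le_rfl v.1 v.2
    simp [List.length_erase_of_mem hv]

-- the tail of A's visit sequence from state v :: (m.erase v): groups of values ≥ v
def pvRestPerms (m : List Int) (x : Int) : List (List Int) :=
  (x :: pvGps (m.filter (fun y => decide (x < y)))).flatMap
    (fun v => (pvLexPerms (m.erase v)).map (fun p => v :: p))

-- the exact sequence of states A's loop visits
inductive pvChains : List Int → List (List Int) → Prop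
  | done {a} : pvStep a = none → pvChains a [a]
  | more {a b l} : pvStep a = some b → pvChains b l → pvChains a (a :: l)

theorem pvLexPerms_nil : pvLexPerms [] = [[]] := by rw [pvLexPerms]

theorem pvLexPerms_cons (x : Int) (t : List Int) :
    pvLexPerms (x :: t) =
      (pvGps (x :: t)).flatMap (fun v => (pvLexPerms ((x :: t).erase v)).map (fun p => v :: p)) := by
  rw [pvLexPerms]
  conv_rhs => rw [← List.attach_map_subtype_val (pvGps (x :: t)), List.flatMap_map]

theorem pvLexPerms_ne_nil_aux : ∀ (n : Nat) (s : List Int), s.length ≤ n → pvLexPerms s ≠ [] := by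
  intro n
  induction n with
  | zero =>
    intro s hs
    have : s = [] := List.length_eq_zero_iff.mp (Nat.le_zero.mp hs)
    subst this; rw [pvLexPerms_nil]; simp
  | succ n ih =>
    intro s hs
    match s with
    | [] => rw [pvLexPerms_nil]; simp
    | x :: t =>
      rw [pvLexPerms_cons, pvGps_cons, List.flatMap_cons]
      have h1 : pvLexPerms ((x :: t).erase x) ≠ [] := by
        rw [List.erase_cons_head]
        exact ih t (by simpa using hs)
      intro hcon
      rcases List.append_eq_nil_iff.mp hcon with ⟨h2, -⟩
      exact h1 (by simpa using h2)

theorem pvLexPerms_ne_nil (s : List Int) : pvLexPerms s ≠ [] :=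
  pvLexPerms_ne_nil_aux s.length s le_rfl

theorem pvRestPerms_ne_nil (m : List Int) (x : Int) : pvRestPerms m x ≠ [] := by
  unfold pvRestPerms
  rw [List.flatMap_cons]
  intro hcon
  rcases List.append_eq_nil_iff.mp hcon with ⟨h2, -⟩
  exact pvLexPerms_ne_nil (m.erase x) (by simpa using h2)

theorem pvRestPerms_head (h : Int) (t : List Int) :
    pvRestPerms (h :: t) h = pvLexPerms (h :: t) := by
  unfold pvRestPerms
  rw [pvLexPerms_cons, pvGps_cons]
  have : (h :: t).filter (fun y => decide (h < y)) = t.filter (fun y => decide (h < y)) := by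
    simp
  rw [this]

theorem pvChains_ne_nil {a C} (h : pvChains a C) : C ≠ [] := by
  cases h <;> simp

-- ---- shift lemmas: one step on x :: u is x :: (one step on u) while u still has an ascent ----
theorem pvFindKAux_cons (x : Int) (u : List Int) :
    ∀ k, pvFindKAux (x :: u) (k+1) =
      (match pvFindKAux u k with
       | some j => some (j+1)
       | none => if x < u.getD 0 0 then some 0 else none) := by
  intro k
  induction k with
  | zero => simp [pvFindKAux]
  | succ k ih =>
    show (if (x :: u).getD (k+1) 0 < (x :: u).getD (k+2) 0 then some (k+1)
          else pvFindKAux (x :: u) (k+1)) = _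
    rw [List.getD_cons_succ, List.getD_cons_succ, ih]
    show _ = (match (if u.getD k 0 < u.getD (k+1) 0 then some k else pvFindKAux u k) with
       | some j => some (j+1)
       | none => if x < u.getD 0 0 then some 0 else none)
    by_cases h : u.getD k 0 < u.getD (k+1) 0
    · rw [if_pos h, if_pos h]
    · rw [if_neg h, if_neg h]

theorem pvFindK_shift {u : List Int} {k : Nat} (x : Int) (h : pvFindK u = some k) :
    pvFindK (x :: u) = some (k+1) := by
  unfold pvFindK at h ⊢
  have hlen : 1 ≤ u.length := by
    by_contra hc
    have : u.length - 1 = 0 := by omega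
    rw [this] at h; simp [pvFindKAux] at h
  have h2 : (x :: u).length - 1 = (u.length - 1) + 1 := by simp; omega
  rw [h2, pvFindKAux_cons, h]

theorem pvFindIAux_cons (x : Int) (u : List Int) (k : Nat) :
    ∀ d, pvFindIAux (x :: u) (k+1) d = pvFindIAux u k d + 1 := by
  intro d
  induction d with
  | zero => simp [pvFindIAux]
  | succ d ih =>
    show (if (x :: u).getD (k+1) 0 < (x :: u).getD (k+1+d+1) 0 then k+1+d+1
          else pvFindIAux (x :: u) (k+1) d) = _
    have he : k+1+d+1 = (k+d+1)+1 := by omega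
    rw [he, List.getD_cons_succ, List.getD_cons_succ, ih]
    show _ = (if u.getD k 0 < u.getD (k+d+1) 0 then k+d+1 else pvFindIAux u k d) + 1
    by_cases h : u.getD k 0 < u.getD (k+d+1) 0
    · rw [if_pos h, if_pos h]
    · rw [if_neg h, if_neg h]

theorem pvFindI_shift (x : Int) (u : List Int) (k : Nat) :
    pvFindI (x :: u) (k+1) = pvFindI u k + 1 := by
  unfold pvFindI
  have he : (x :: u).length - 1 - (k+1) = u.length - 1 - k := by simp; omega
  rw [he, pvFindIAux_cons]

theorem pvStep_shift {u v : List Int} (x : Int) (h : pvStep u = some v) :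
    pvStep (x :: u) = some (x :: v) := by
  unfold pvStep at h ⊢
  cases hk : pvFindK u with
  | none => rw [hk] at h; simp at h
  | some k =>
    rw [hk] at h
    rw [pvFindK_shift x hk]
    simp only [pvFindI_shift, List.getD_cons_succ, List.set_cons_succ,
      List.take_succ_cons, List.drop_succ_cons]
    simp only [Option.some.injEq] at h ⊢
    rw [← h, List.cons_append]

-- ---- step = none on nonincreasing lists ----
theorem pvFindKAux_eq_none (a : List Int) :
    ∀ m, (∀ j, j < m → ¬ (a.getD j 0 < a.getD (j+1) 0)) → pvFindKAux a m = none := by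
  intro m
  induction m with
  | zero => intro _; rfl
  | succ m ih =>
    intro h
    show (if a.getD m 0 < a.getD (m+1) 0 then some m else pvFindKAux a m) = none
    rw [if_neg (h m (Nat.lt_succ_self m))]
    exact ih (fun j hj => h j (Nat.lt_succ_of_lt hj))

theorem pvStep_none_of_desc {a : List Int}
    (h : ∀ i j (hi : i < a.length) (hj : j < a.length), i < j → a[j] ≤ a[i]) :
    pvStep a = none := by
  unfold pvStep pvFindK
  rw [pvFindKAux_eq_none]
  intro j hj
  have hj1 : j + 1 < a.length := by omega
  have hj0 : j < a.length := by omega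
  rw [List.getD_eq_getElem a 0 hj0, List.getD_eq_getElem a 0 hj1]
  exact not_lt.mpr (h j (j+1) hj0 hj1 (Nat.lt_succ_self j))

-- ---- the carry step at the end of a group ----
theorem pvFindKAux_first (a : List Int) :
    ∀ m, 1 ≤ m → (∀ j, 0 < j → j < m → ¬ (a.getD j 0 < a.getD (j+1) 0)) →
      a.getD 0 0 < a.getD 1 0 → pvFindKAux a m = some 0 := by
  intro m
  induction m with
  | zero => omega
  | succ m ih =>
    intro _ hj h0
    show (if a.getD m 0 < a.getD (m+1) 0 then some m else pvFindKAux a m) = some 0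
    match m with
    | 0 => rw [if_pos h0]
    | m'+1 =>
      rw [if_neg (hj (m'+1) (by omega) (by omega))]
      exact ih (by omega) (fun j hj0 hjm => hj j hj0 (by omega)) h0

theorem pvFindIAux_locate (a : List Int) (i₀ : Nat) (h₀ : 1 ≤ i₀)
    (hsucc : a.getD 0 0 < a.getD i₀ 0) :
    ∀ c, (∀ j, i₀ < j → j ≤ i₀ + c → ¬ (a.getD 0 0 < a.getD j 0)) →
      pvFindIAux a 0 (i₀ + c) = i₀ := by
  intro c
  induction c with
  | zero =>
    intro _
    obtain ⟨d, rfl⟩ : ∃ d, i₀ = d + 1 := ⟨i₀ - 1, by omega⟩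
    show (if a.getD 0 0 < a.getD (0+d+1) 0 then 0+d+1 else pvFindIAux a 0 d) = d + 1
    simp only [Nat.zero_add]
    rw [if_pos hsucc]
  | succ c ih =>
    intro h
    have he : i₀ + (c+1) = (i₀ + c) + 1 := by omega
    rw [he]
    show (if a.getD 0 0 < a.getD (0+(i₀+c)+1) 0 then 0+(i₀+c)+1 else pvFindIAux a 0 (i₀+c)) = i₀
    simp only [Nat.zero_add]
    rw [if_neg (h (i₀+c+1) (by omega) (by omega))]
    exact ih (fun j hj1 hj2 => h j hj1 (by omega))

theorem pvStep_carry (x y : Int) (e₁ e₂' : List Int)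
    (hsorted : (e₁ ++ y :: e₂').Pairwise (· ≤ ·))
    (h₁ : ∀ z ∈ e₁, z ≤ x) (hy : x < y) :
    pvStep (x :: (e₁ ++ y :: e₂').reverse) = some (y :: (e₁ ++ x :: e₂')) := by
  set e := e₁ ++ y :: e₂' with he
  set rev := e.reverse with hrev
  set a := x :: rev with ha
  have hrevsplit : rev = e₂'.reverse ++ y :: e₁.reverse := by
    rw [hrev, he]; simp
  have hrevlen : rev.length = e₁.length + e₂'.length + 1 := by
    rw [hrevsplit]; simp; omega
  have halen : a.length = e₁.length + e₂'.length + 2 := by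
    rw [ha]; simp [hrevlen]
  set i₀ := e₂'.length + 1 with hi₀
  have hrevdesc : rev.Pairwise (fun p q => q ≤ p) := by
    rw [hrev, List.pairwise_reverse]
    exact hsorted
  -- a.getD j for j ≥ 1 is rev[j-1]
  have hgetD : ∀ j (hj : j < rev.length), a.getD (j+1) 0 = rev[j] := by
    intro j hj
    rw [ha, List.getD_cons_succ, List.getD_eq_getElem rev 0 hj]
  have hyidx : e₂'.length < rev.length := by omega
  have hrevy : rev[e₂'.length]'hyidx = y := by
    rw [List.getElem_of_eq hrevsplit, List.getElem_append_right (by simp)]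
    simp
  have hA0 : a.getD 0 0 = x := rfl
  have hAi : a.getD i₀ 0 = y := by
    rw [hi₀, hgetD _ hyidx, hrevy]
  -- find k = 0
  have hfindK : pvFindK a = some 0 := by
    unfold pvFindK
    have hlen1 : a.length - 1 = e₁.length + e₂'.length + 1 := by omega
    rw [hlen1]
    refine pvFindKAux_first a _ (by omega) ?_ ?_
    · intro j hj0 hjm
      obtain ⟨j', rfl⟩ : ∃ j', j = j' + 1 := ⟨j - 1, by omega⟩
      have hj'1 : j' + 1 < rev.length := by omega
      have hj' : j' < rev.length := by omega
      rw [hgetD _ hj', hgetD _ hj'1]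
      have := List.pairwise_iff_getElem.mp hrevdesc j' (j'+1) hj' hj'1 (Nat.lt_succ_self _)
      exact not_lt.mpr this
    · have h0 : (0:Nat) < rev.length := by omega
      rw [hA0, hgetD 0 h0]
      have hylt : y ≤ rev[0]'h0 := by
        rcases Nat.eq_zero_or_pos e₂'.length with hz | hpos
        · have h2 : e₂' = [] := List.length_eq_zero_iff.mp hz
          subst h2
          exact le_of_eq hrevy.symm
        · have := List.pairwise_iff_getElem.mp hrevdesc 0 e₂'.length h0 hyidx hpos
          rw [hrevy] at this; exact this
      exact lt_of_lt_of_le hy hylt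
  -- find i = i₀
  have hfindI : pvFindI a 0 = i₀ := by
    unfold pvFindI
    have hlen2 : a.length - 1 - 0 = i₀ + e₁.length := by omega
    rw [hlen2]
    refine pvFindIAux_locate a i₀ (by omega) (by rw [hA0, hAi]; exact hy) _ ?_
    intro j hj1 hj2
    obtain ⟨j', rfl⟩ : ∃ j', j = j' + 1 := ⟨j - 1, by omega⟩
    have hj' : j' < rev.length := by omega
    rw [hA0, hgetD _ hj']
    have hj'el : rev[j'] ∈ e₁ := by
      rw [List.getElem_of_eq hrevsplit, List.getElem_append_right (by simp; omega)]
      have : ∀ i (h : i < (y :: e₁.reverse).length), 0 < i → (y :: e₁.reverse)[i] ∈ e₁ := by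
        intro i h hi
        obtain ⟨i', rfl⟩ : ∃ i', i = i' + 1 := ⟨i - 1, by omega⟩
        rw [List.getElem_cons_succ]
        exact List.mem_reverse.mp (List.getElem_mem _)
      exact this _ _ (by simp; omega)
    exact not_lt.mpr (h₁ _ hj'el)
  -- assemble
  show pvStep a = _
  unfold pvStep
  rw [hfindK]
  simp only [hfindI, hA0, hAi]
  have hset : (a.set 0 y).set i₀ x = y :: (e₂'.reverse ++ x :: e₁.reverse) := by
    rw [ha]
    show (y :: rev).set (e₂'.length + 1) x = _
    rw [List.set_cons_succ, hrevsplit,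
      List.set_append_right _ _ (by simp)]
    simp
  rw [hset]
  simp [List.reverse_append]

theorem pvDropWhile_head : ∀ (l : List Int) (p : Int → Bool) (y : Int) (t : List Int),
    l.dropWhile p = y :: t → p y = false := by
  intro l p
  induction l with
  | nil => intro y t h; simp [List.dropWhile] at h
  | cons a l' ih =>
    intro y t h
    rw [List.dropWhile_cons] at h
    by_cases hp : p a
    · rw [if_pos hp] at h; exact ih y t h
    · rw [if_neg hp] at h
      cases h
      simpa using hp

theorem pvDropWhile_gt (x : Int) (rest : List Int)
    (hs : (x :: rest).Pairwise (· ≤ ·)) :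
    ∀ w ∈ rest.dropWhile (fun y => y == x), x < w := by
  cases hdw : rest.dropWhile (fun y => y == x) with
  | nil => simp
  | cons y₀ t =>
    have hy₀ne : y₀ ≠ x := by
      have := pvDropWhile_head rest _ y₀ t hdw
      simpa using this
    have hy₀mem : y₀ ∈ rest := (List.dropWhile_sublist _).mem (by rw [hdw]; simp)
    have hy₀le : x ≤ y₀ := (List.pairwise_cons.mp hs).1 y₀ hy₀mem
    have hy₀lt : x < y₀ := lt_of_le_of_ne hy₀le (Ne.symm hy₀ne)
    have hdwsorted : (y₀ :: t).Pairwise (· ≤ ·) := by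
      rw [← hdw]
      exact hs.sublist ((List.dropWhile_sublist _).trans (List.sublist_cons_self x rest))
    intro w hw
    rcases List.mem_cons.mp hw with rfl | hw
    · exact hy₀lt
    · exact lt_of_lt_of_le hy₀lt ((List.pairwise_cons.mp hdwsorted).1 w hw)

-- ---- lifting a chain of u to a chain of x :: u ----
theorem pvChains_cons (x : Int) {u : List Int} {C : List (List Int)} (h : pvChains u C)
    {d : List Int} (hlast : C.getLast? = some d) :
    (pvStep (x :: d) = none → pvChains (x :: u) (C.map (fun p => x :: p))) ∧
    (∀ b C', pvStep (x :: d) = some b → pvChains b C' →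
        pvChains (x :: u) (C.map (fun p => x :: p) ++ C')) := by
  induction h with
  | @done a ha =>
    simp only [List.getLast?_singleton, Option.some.injEq] at hlast
    subst hlast
    constructor
    · intro hn
      exact pvChains.done hn
    · intro b C' hs hC'
      exact pvChains.more hs hC'
  | @more a b l hs hl ih =>
    have hlne : l ≠ [] := pvChains_ne_nil hl
    have hlast' : l.getLast? = some d := by
      obtain ⟨q, l', rfl⟩ := List.exists_cons_of_ne_nil hlne
      rwa [List.getLast?_cons_cons] at hlast
    have ih' := ih hlast'
    have hshift : pvStep (x :: a) = some (x :: b) := pvStep_shift x hs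
    constructor
    · intro hn
      rw [List.map_cons]
      exact pvChains.more hshift (ih'.1 hn)
    · intro b' C' hs' hC'
      rw [List.map_cons, List.cons_append]
      exact pvChains.more hshift (ih'.2 b' C' hs' hC')

-- ---- the main characterisation of A's visit sequence ----
theorem pvMainch (N : Nat) :
    ∀ (G : Nat) (m : List Int) (x : Int), m.length ≤ N + 1 →
      (pvGps (m.filter (fun y => decide (x < y)))).length ≤ G →
      m.Pairwise (· ≤ ·) → x ∈ m →
      pvChains (x :: m.erase x) (pvRestPerms m x) ∧
        (pvRestPerms m x).getLast? = some m.reverse := by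
  induction N with
  | zero =>
    -- m = [x]
    intro G m x hm hG hsort hx
    have hm1 : m = [x] := by
      have h1 : 1 ≤ m.length := List.length_pos_of_mem hx
      have h2 : m.length = 1 := by omega
      obtain ⟨a, rfl⟩ := List.length_eq_one_iff.mp h2
      rcases List.mem_singleton.mp hx with rfl
      rfl
    subst hm1
    have hrest : pvRestPerms [x] x = [[x]] := by
      unfold pvRestPerms
      have hfe : ([x].filter (fun y => decide (x < y))) = [] := by simp
      rw [hfe, pvGps_nil]
      simp [List.erase_cons_head, pvLexPerms_nil]
    refine ⟨?_, ?_⟩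
    · rw [hrest, List.erase_cons_head]
      exact pvChains.done rfl
    · rw [hrest]; rfl
  | succ N ihN =>
    intro G
    induction G with
    | zero =>
      intro m x hm hG hsort hx
      -- no value of m exceeds x
      have hfilter : m.filter (fun y => decide (x < y)) = [] := by
        by_contra hc
        obtain ⟨yf, tf, hf⟩ := List.exists_cons_of_ne_nil hc
        rw [hf, pvGps_cons] at hG
        simp at hG
      have hle : ∀ z ∈ m, z ≤ x := by
        intro z hz
        have := List.filter_eq_nil_iff.mp hfilter z hz
        simpa using this
      have hrest : pvRestPerms m x = (pvLexPerms (m.erase x)).map (fun p => x :: p) := by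
        unfold pvRestPerms
        rw [hfilter, pvGps_nil]
        simp
      have hsortu : (m.erase x).Pairwise (· ≤ ·) := hsort.sublist List.erase_sublist
      by_cases hu : m.erase x = []
      · have hlen1 : m.length = 1 := by
          have h1 := List.length_erase_of_mem hx
          rw [hu] at h1
          have h2 : 1 ≤ m.length := List.length_pos_of_mem hx
          simp at h1; omega
        obtain ⟨a, rfl⟩ := List.length_eq_one_iff.mp hlen1
        rcases List.mem_singleton.mp hx with rfl
        refine ⟨?_, ?_⟩
        · rw [hrest, List.erase_cons_head, pvLexPerms_nil]
          exact pvChains.done rfl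
        · rw [hrest, List.erase_cons_head, pvLexPerms_nil]; rfl
      · -- x is the maximum, one group only
        have hmN : (m.erase x).length ≤ N + 1 := by
          have h1 := List.length_erase_of_mem hx
          have h2 : 1 ≤ m.length := List.length_pos_of_mem hx
          omega
        have hU : pvChains (m.erase x) (pvLexPerms (m.erase x)) ∧
            (pvLexPerms (m.erase x)).getLast? = some (m.erase x).reverse := by
          obtain ⟨h0, t0, hu_eq⟩ := List.exists_cons_of_ne_nil hu
          have hh := ihN (pvGps ((h0 :: t0).filter (fun y => decide (h0 < y)))).length
            (h0 :: t0) h0 (by rw [← hu_eq]; exact hmN) le_rfl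
            (by rw [← hu_eq]; exact hsortu) List.mem_cons_self
          rw [List.erase_cons_head, pvRestPerms_head] at hh
          rw [hu_eq]; exact hh
        have hdesc : pvStep (x :: (m.erase x).reverse) = none := by
          apply pvStep_none_of_desc
          have hpw : (x :: (m.erase x).reverse).Pairwise (fun p q => q ≤ p) := by
            refine List.pairwise_cons.mpr ⟨?_, ?_⟩
            · intro w hw
              rw [List.mem_reverse] at hw
              exact hle w (List.mem_of_mem_erase hw)
            · rw [List.pairwise_reverse]
              exact hsortu
          intro i j hi hj hij
          exact List.pairwise_iff_getElem.mp hpw i j hi hj hij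
        have hlift := (pvChains_cons x hU.1 hU.2).1 hdesc
        have hm_eq : m = (m.erase x) ++ [x] := by
          refine ((List.perm_cons_erase hx).trans
            (List.perm_append_singleton x (m.erase x)).symm).eq_of_pairwise
            (fun a b _ _ h h' => le_antisymm h h') hsort ?_
          rw [List.pairwise_append]
          refine ⟨hsortu, by simp, ?_⟩
          intro z hz w hw
          rcases List.mem_singleton.mp hw with rfl
          exact hle z (List.mem_of_mem_erase hz)
        refine ⟨?_, ?_⟩
        · rw [hrest]; exact hlift
        · rw [hrest, List.getLast?_map, hU.2]
          conv_rhs => rw [hm_eq]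
          simp
    | succ G ihG =>
      intro m x hm hG hsort hx
      by_cases hforall : m.filter (fun y => decide (x < y)) = []
      · exact ihG m x hm (by rw [hforall, pvGps_nil]; simp) hsort hx
      · -- there is a value above x: the carry into the next group
        have hex : ∃ y ∈ m, x < y := by
          obtain ⟨yf, tf, hf⟩ := List.exists_cons_of_ne_nil hforall
          have : yf ∈ m.filter (fun y => decide (x < y)) := by rw [hf]; simp
          exact ⟨yf, List.mem_of_mem_filter this, by simpa using List.of_mem_filter this⟩
        obtain ⟨y1, hy1m, hy1x⟩ := hex
        have hy1u : y1 ∈ m.erase x :=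
          (List.mem_erase_of_ne (ne_of_gt hy1x)).mpr hy1m
        have hune : m.erase x ≠ [] := List.ne_nil_of_mem hy1u
        have hsortu : (m.erase x).Pairwise (· ≤ ·) := hsort.sublist List.erase_sublist
        have hmN : (m.erase x).length ≤ N + 1 := by
          have h1 := List.length_erase_of_mem hx
          have h2 : 1 ≤ m.length := List.length_pos_of_mem hx
          omega
        set e₁ := (m.erase x).takeWhile (fun z => decide (z ≤ x)) with he₁
        set dwu := (m.erase x).dropWhile (fun z => decide (z ≤ x)) with hdwu
        have hsplitu : e₁ ++ dwu = m.erase x := List.takeWhile_append_dropWhile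
        have h₁ : ∀ z ∈ e₁, z ≤ x := by
          intro z hz
          have := List.mem_takeWhile_imp hz
          simpa using this
        have hdwne : dwu ≠ [] := by
          intro hc
          rw [hc, List.append_nil] at hsplitu
          have : y1 ∈ e₁ := by rw [hsplitu]; exact hy1u
          exact absurd (h₁ y1 this) (not_le.mpr hy1x)
        obtain ⟨y₀, e₂', hdweq⟩ := List.exists_cons_of_ne_nil hdwne
        have hy₀x : x < y₀ := by
          have := pvDropWhile_head (m.erase x) _ y₀ e₂' (by rw [← hdwu, hdweq])
          simpa using this
        have husplit : m.erase x = e₁ ++ y₀ :: e₂' := by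
          rw [← hsplitu, hdweq]
        have hsortu' : (e₁ ++ y₀ :: e₂').Pairwise (· ≤ ·) := by rw [← husplit]; exact hsortu
        have hparts := List.pairwise_append.mp hsortu'
        have he₂ge : ∀ w ∈ e₂', y₀ ≤ w := (List.pairwise_cons.mp hparts.2.1).1
        have hm_eq : m = e₁ ++ x :: y₀ :: e₂' := by
          refine ((List.perm_cons_erase hx).trans
            (by rw [husplit]; exact List.perm_middle.symm)).eq_of_pairwise
            (fun a b _ _ h h' => le_antisymm h h') hsort ?_
          rw [List.pairwise_append]
          refine ⟨hparts.1, ?_, ?_⟩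
          · refine List.pairwise_cons.mpr ⟨?_, hparts.2.1⟩
            intro b hb
            rcases List.mem_cons.mp hb with rfl | hb
            · exact le_of_lt hy₀x
            · exact le_of_lt (lt_of_lt_of_le hy₀x (he₂ge b hb))
          · intro z hz w hw
            have hzx : z ≤ x := h₁ z hz
            rcases List.mem_cons.mp hw with rfl | hw
            · exact hzx
            · rcases List.mem_cons.mp hw with rfl | hw
              · exact le_of_lt (lt_of_le_of_lt hzx hy₀x)
              · exact le_of_lt (lt_of_le_of_lt hzx (lt_of_lt_of_le hy₀x (he₂ge w hw)))
        have hy₀m : y₀ ∈ m := by rw [hm_eq]; simp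
        have hy₀note₁ : y₀ ∉ e₁ := fun hc => absurd (h₁ y₀ hc) (not_le.mpr hy₀x)
        have hmey : m.erase y₀ = e₁ ++ x :: e₂' := by
          conv_lhs => rw [hm_eq]
          rw [List.erase_append_right _ hy₀note₁]
          congr 1
          rw [List.erase_cons_tail (by simp [ne_of_lt hy₀x]), List.erase_cons_head]
        have hfe₁ : ∀ (p : Int → Bool), (∀ z ∈ e₁, p z = false) → e₁.filter p = [] := by
          intro p hp
          exact List.filter_eq_nil_iff.mpr (fun z hz => by rw [hp z hz]; simp)
        have hfiltx : m.filter (fun z => decide (x < z)) = y₀ :: e₂' := by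
          rw [hm_eq, List.filter_append]
          rw [hfe₁ _ (fun z hz => by simpa using not_lt.mpr (h₁ z hz))]
          simp only [List.nil_append, List.filter_cons]
          rw [if_neg (by simp), if_pos (by simpa using hy₀x)]
          congr 1
          exact List.filter_eq_self.mpr
            (fun w hw => by simpa using lt_of_lt_of_le hy₀x (he₂ge w hw))
        have hfilty : m.filter (fun z => decide (y₀ < z)) =
            e₂'.filter (fun z => decide (y₀ < z)) := by
          rw [hm_eq, List.filter_append]
          rw [hfe₁ _ (fun z hz => by
            simpa using not_lt.mpr (le_of_lt (lt_of_le_of_lt (h₁ z hz) hy₀x)))]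
          simp only [List.nil_append, List.filter_cons]
          rw [if_neg (by simpa using not_lt.mpr (le_of_lt hy₀x)), if_neg (by simp)]
        have hgpseq : pvGps (m.filter (fun z => decide (x < z))) =
            y₀ :: pvGps (m.filter (fun z => decide (y₀ < z))) := by
          rw [hfiltx, pvGps_cons, ← hfilty]
        have hcount : (pvGps (m.filter (fun z => decide (y₀ < z)))).length ≤ G := by
          rw [hgpseq] at hG
          simpa using hG
        have hU : pvChains (m.erase x) (pvLexPerms (m.erase x)) ∧
            (pvLexPerms (m.erase x)).getLast? = some (m.erase x).reverse := by
          obtain ⟨h0, t0, hu_eq⟩ := List.exists_cons_of_ne_nil hune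
          have hh := ihN (pvGps ((h0 :: t0).filter (fun y => decide (h0 < y)))).length
            (h0 :: t0) h0 (by rw [← hu_eq]; exact hmN) le_rfl
            (by rw [← hu_eq]; exact hsortu) List.mem_cons_self
          rw [List.erase_cons_head, pvRestPerms_head] at hh
          rw [hu_eq]; exact hh
        have hrec := ihG m y₀ hm hcount hsort hy₀m
        have hcarry : pvStep (x :: (m.erase x).reverse) = some (y₀ :: m.erase y₀) := by
          rw [hmey]
          conv_lhs => rw [husplit]
          exact pvStep_carry x y₀ e₁ e₂' hsortu' h₁ hy₀x
        have hlift := (pvChains_cons x hU.1 hU.2).2 _ _ hcarry hrec.1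
        have hrestx : pvRestPerms m x =
            (pvLexPerms (m.erase x)).map (fun p => x :: p) ++ pvRestPerms m y₀ := by
          unfold pvRestPerms
          rw [List.flatMap_cons, hgpseq, List.flatMap_cons]
        refine ⟨?_, ?_⟩
        · rw [hrestx]
          unfold pvRestPerms at hlift
          rw [List.flatMap_cons] at hlift
          exact hlift
        · rw [hrestx, List.getLast?_append_of_ne_nil _ (pvRestPerms_ne_nil m y₀), hrec.2]

-- ---- from chains to A's loop ----
theorem pvLoop_of_chains {a C} (h : pvChains a C) :
    ∀ f, C.length ≤ f → ∀ lim r,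
      pvLoop f lim a r = List.foldl pvIns r (C.map (fun p => p.take lim)) := by
  induction h with
  | @done a ha =>
    intro f hf lim r
    match f with
    | f'+1 =>
      show (match pvStep a with
            | none => if a.take lim ∈ r then r else r ++ [a.take lim]
            | some b => pvLoop f' lim b (if a.take lim ∈ r then r else r ++ [a.take lim])) = _
      rw [ha]
      simp [pvIns]
  | @more a b l hs hl ih =>
    intro f hf lim r
    match f with
    | f'+1 =>
      show (match pvStep a with
            | none => if a.take lim ∈ r then r else r ++ [a.take lim]
            | some b => pvLoop f' lim b (if a.take lim ∈ r then r else r ++ [a.take lim])) = _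
      rw [hs, List.map_cons, List.foldl_cons]
      exact ih f' (by simp at hf; omega) lim _

theorem pvGps_length_le : ∀ (n : Nat) (l : List Int), l.length ≤ n →
    (pvGps l).length ≤ l.length := by
  intro n
  induction n with
  | zero =>
    intro l hl
    have : l = [] := List.length_eq_zero_iff.mp (Nat.le_zero.mp hl)
    subst this; rw [pvGps_nil]
  | succ n ih =>
    intro l hl
    match l with
    | [] => rw [pvGps_nil]
    | a :: b =>
      rw [pvGps_cons]
      simp only [List.length_cons, Nat.add_le_add_iff_right]
      have hf := List.length_filter_le (fun y => decide (a < y)) b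
      have h2 := ih (b.filter (fun y => decide (a < y))) (by simp at hl; omega)
      omega

theorem pvLexPerms_length_le_aux : ∀ (n : Nat) (s : List Int), s.length ≤ n →
    (pvLexPerms s).length ≤ Nat.factorial s.length := by
  intro n
  induction n with
  | zero =>
    intro s hs
    have : s = [] := List.length_eq_zero_iff.mp (Nat.le_zero.mp hs)
    subst this; rw [pvLexPerms_nil]; simp
  | succ n ih =>
    intro s hs
    match s with
    | [] => rw [pvLexPerms_nil]; simp
    | x :: t =>
      rw [pvLexPerms_cons, List.length_flatMap]
      have hbound : ∀ q ∈ (pvGps (x :: t)).map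
          (fun v => ((pvLexPerms ((x :: t).erase v)).map (fun p => v :: p)).length),
          q ≤ Nat.factorial t.length := by
        intro q hq
        rcases List.mem_map.mp hq with ⟨v, hv, rfl⟩
        have hvm : v ∈ x :: t := mem_pvGps (x :: t).length _ le_rfl v hv
        have hlen : ((x :: t).erase v).length = t.length := by
          rw [List.length_erase_of_mem hvm]; simp
        rw [List.length_map]
        calc (pvLexPerms ((x :: t).erase v)).length
            ≤ Nat.factorial ((x :: t).erase v).length := by
              refine ih _ ?_
              rw [hlen]; simpa using hs
          _ = Nat.factorial t.length := by rw [hlen]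
      calc ((pvGps (x :: t)).map _).sum
          ≤ ((pvGps (x :: t)).map (fun v =>
              ((pvLexPerms ((x :: t).erase v)).map (fun p => v :: p)).length)).length •
              Nat.factorial t.length := List.sum_le_card_nsmul _ _ hbound
        _ = ((pvGps (x :: t)).length) * Nat.factorial t.length := by
            rw [List.length_map, smul_eq_mul]
        _ ≤ (x :: t).length * Nat.factorial t.length :=
            Nat.mul_le_mul_right _ (pvGps_length_le (x :: t).length _ le_rfl)
        _ = Nat.factorial (x :: t).length := by
            simp [Nat.factorial_succ]

theorem pvLexPerms_length_le (s : List Int) : (pvLexPerms s).length ≤ Nat.factorial s.length :=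
  pvLexPerms_length_le_aux s.length s le_rfl

-- ---- B characterisation ----

theorem pvGenGo_eq : ∀ (n : Nat) (k : Nat) (r pre : List Int), r.length ≤ n →
    (pre ++ r).Pairwise (· ≤ ·) → (∀ z ∈ pre, z ∉ r) →
      pvGenGo (pvGen k) pre r =
        (pvGps r).flatMap (fun v => (pvGen k ((pre ++ r).erase v)).map (fun p => v :: p)) := by
  intro n
  induction n with
  | zero =>
    intro k r pre hr _ _
    have : r = [] := List.length_eq_zero_iff.mp (Nat.le_zero.mp hr)
    subst this
    rw [pvGps_nil]
    simp [pvGenGo]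
  | succ n ih =>
    intro k r pre hr hsorted hdisj
    match r with
    | [] => rw [pvGps_nil]; simp [pvGenGo]
    | x :: rest =>
      set tw := rest.takeWhile (fun y => y == x) with htw
      set dw := rest.dropWhile (fun y => y == x) with hdw
      have hxr : (x :: rest).Pairwise (· ≤ ·) :=
        hsorted.sublist (List.sublist_append_right pre _)
      have hdwgt : ∀ w ∈ dw, x < w := pvDropWhile_gt x rest hxr
      have htweq : ∀ z ∈ tw, z = x := by
        intro z hz
        have := List.mem_takeWhile_imp hz
        simpa using this
      have hxnotpre : x ∉ pre := by
        intro hx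
        exact hdisj x hx (List.mem_cons_self)
      have herase : (pre ++ x :: rest).erase x = pre ++ rest := by
        rw [List.erase_append_right _ hxnotpre, List.erase_cons_head]
      have hsplit_list : (pre ++ x :: tw) ++ dw = pre ++ x :: rest := by
        rw [List.append_assoc, List.cons_append, htw, hdw,
          List.takeWhile_append_dropWhile]
      have hfilter : rest.filter (fun y => decide (x < y)) = dw := by
        conv_lhs => rw [← List.takeWhile_append_dropWhile (p := fun y => y == x) (l := rest)]
        rw [List.filter_append]
        have h1 : tw.filter (fun y => decide (x < y)) = [] := by
          rw [List.filter_eq_nil_iff]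
          intro z hz
          rw [htweq z hz]
          simp
        have h2 : dw.filter (fun y => decide (x < y)) = dw := by
          rw [List.filter_eq_self]
          intro z hz
          simpa using hdwgt z hz
        rw [← htw, ← hdw, h1, h2, List.nil_append]
      have hih : pvGenGo (pvGen k) (pre ++ x :: tw) dw =
          (pvGps dw).flatMap
            (fun v => (pvGen k ((pre ++ x :: rest).erase v)).map (fun p => v :: p)) := by
        rw [← hsplit_list]
        refine ih k dw (pre ++ x :: tw) ?_ ?_ ?_
        · have h1 := List.length_dropWhile_le (fun y => y == x) rest
          simp at hr
          rw [hdw]; omega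
        · rw [hsplit_list]; exact hsorted
        · intro z hz
          rcases List.mem_append.mp hz with hz | hz
          · intro hzdw
            exact hdisj z hz (List.mem_cons_of_mem _ ((List.dropWhile_sublist _).mem hzdw))
          · have hzx : z = x := by
              rcases List.mem_cons.mp hz with rfl | hz
              · rfl
              · exact htweq z hz
            subst hzx
            intro hzdw
            exact absurd (hdwgt z hzdw) (lt_irrefl z)
      rw [pvGenGo, hih, pvGps_cons, hfilter, List.flatMap_cons, herase]

-- ---- folding A's dedup over the prefix list gives B ----
theorem pvFoldl_ins_map (x : Int) : ∀ (l r acc : List (List Int)),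
    (∀ q ∈ r, q.head? ≠ some x) →
    List.foldl pvIns (r ++ acc.map (fun p => x :: p)) (l.map (fun p => x :: p)) =
      r ++ (List.foldl pvIns acc l).map (fun p => x :: p) := by
  intro l
  induction l with
  | nil => intro r acc _; simp
  | cons p l' ih =>
    intro r acc hr
    rw [List.map_cons, List.foldl_cons, List.foldl_cons]
    have hmem : ((x :: p) ∈ r ++ acc.map (fun p => x :: p)) ↔ p ∈ acc := by
      rw [List.mem_append]
      constructor
      · rintro (h | h)
        · exact absurd (rfl : (x :: p).head? = some x) (hr _ h)
        · rcases List.mem_map.mp h with ⟨q, hq, he⟩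
          cases he
          exact hq
      · intro h
        exact Or.inr (List.mem_map_of_mem h)
    by_cases hp : p ∈ acc
    · have h1 : pvIns (r ++ acc.map (fun p => x :: p)) (x :: p) =
          r ++ acc.map (fun p => x :: p) := by
        unfold pvIns; rw [if_pos (hmem.mpr hp)]
      have h2 : pvIns acc p = acc := by unfold pvIns; rw [if_pos hp]
      rw [h1, h2]
      exact ih r acc hr
    · have h1 : pvIns (r ++ acc.map (fun p => x :: p)) (x :: p) =
          r ++ (acc ++ [p]).map (fun p => x :: p) := by
        unfold pvIns
        rw [if_neg (fun hc => hp (hmem.mp hc)), List.map_append, List.append_assoc]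
        rfl
      have h2 : pvIns acc p = acc ++ [p] := by unfold pvIns; rw [if_neg hp]
      rw [h1, h2]
      exact ih r (acc ++ [p]) hr

theorem pvFoldl_take_zero_aux : ∀ (L : List (List Int)),
    List.foldl pvIns [[]] (L.map (fun p => p.take 0)) = [[]] := by
  intro L
  induction L with
  | nil => rfl
  | cons p L' ih =>
    rw [List.map_cons, List.foldl_cons, List.take_zero]
    have : pvIns [[]] [] = [[]] := by unfold pvIns; rw [if_pos (by simp)]
    rw [this, ih]

theorem pvFoldl_take_zero (L : List (List Int)) (hL : L ≠ []) :
    List.foldl pvIns [] (L.map (fun p => p.take 0)) = [[]] := by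
  obtain ⟨q, L', rfl⟩ := List.exists_cons_of_ne_nil hL
  rw [List.map_cons, List.foldl_cons, List.take_zero]
  have : pvIns [] [] = [[]] := by unfold pvIns; rw [if_neg (by simp)]; rfl
  rw [this, pvFoldl_take_zero_aux]

theorem pvFG : ∀ (gl : List Int) (s : List Int) (k : Nat) (r : List (List Int)),
    gl.Pairwise (· ≠ ·) →
    (∀ q ∈ r, ∀ v ∈ gl, q.head? ≠ some v) →
    (∀ v ∈ gl, List.foldl pvIns []
        ((pvLexPerms (s.erase v)).map (fun p => p.take k)) = pvGen k (s.erase v)) →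
    List.foldl pvIns r
        ((gl.flatMap (fun v => (pvLexPerms (s.erase v)).map (fun p => v :: p))).map
          (fun p => p.take (k+1))) =
      r ++ gl.flatMap (fun v => (pvGen k (s.erase v)).map (fun p => v :: p)) := by
  intro gl
  induction gl with
  | nil => intro s k r _ _ _; simp
  | cons v gl' ih =>
    intro s k r hpw hr hf
    rw [List.flatMap_cons, List.map_append, List.foldl_append]
    have hgroup : ((pvLexPerms (s.erase v)).map (fun p => v :: p)).map (fun p => p.take (k+1))
        = ((pvLexPerms (s.erase v)).map (fun p => p.take k)).map (fun p => v :: p) := by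
      rw [List.map_map, List.map_map]
      rfl
    rw [hgroup]
    have h2 := pvFoldl_ins_map v ((pvLexPerms (s.erase v)).map (fun p => p.take k)) r []
      (fun q hq => hr q hq v List.mem_cons_self)
    simp only [List.map_nil, List.append_nil] at h2
    rw [h2, hf v List.mem_cons_self]
    rw [ih s k _ (List.pairwise_cons.mp hpw).2 ?hinv
      (fun v' hv' => hf v' (List.mem_cons_of_mem _ hv'))]
    · rw [List.flatMap_cons, List.append_assoc]
    case hinv =>
      intro q hq v' hv'
      rcases List.mem_append.mp hq with hq | hq
      · exact hr q hq v' (List.mem_cons_of_mem _ hv')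
      · rcases List.mem_map.mp hq with ⟨p, hp, rfl⟩
        have hne : v ≠ v' := (List.pairwise_cons.mp hpw).1 v' hv'
        simpa using hne

theorem pvFold_eq : ∀ (n : Nat) (s : List Int) (k : Nat), s.length ≤ n →
    s.Pairwise (· ≤ ·) → k ≤ s.length →
    List.foldl pvIns [] ((pvLexPerms s).map (fun p => p.take k)) = pvGen k s := by
  intro n
  induction n with
  | zero =>
    intro s k hs _ hk
    have hse : s = [] := List.length_eq_zero_iff.mp (Nat.le_zero.mp hs)
    subst hse
    have hk0 : k = 0 := by simpa using hk
    subst hk0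
    rw [pvLexPerms_nil]
    have : pvIns [] [] = [[]] := by unfold pvIns; rw [if_neg (by simp)]; rfl
    simp [this, pvGen]
  | succ n ih =>
    intro s k hs hsort hk
    match k with
    | 0 =>
      rw [pvFoldl_take_zero _ (pvLexPerms_ne_nil s)]
      rfl
    | k+1 =>
      have hsne : s ≠ [] := by
        intro h; subst h; simp at hk
      obtain ⟨x, t, rfl⟩ := List.exists_cons_of_ne_nil hsne
      have hpw : (pvGps (x :: t)).Pairwise (· ≠ ·) :=
        (pvGps_pairwise_lt (x :: t).length _ le_rfl).imp (fun h => ne_of_lt h)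
      have hf : ∀ v ∈ pvGps (x :: t), List.foldl pvIns []
          ((pvLexPerms ((x :: t).erase v)).map (fun p => p.take k)) =
            pvGen k ((x :: t).erase v) := by
        intro v hv
        have hvm : v ∈ x :: t := mem_pvGps (x :: t).length _ le_rfl v hv
        have hlen : ((x :: t).erase v).length = t.length := by
          rw [List.length_erase_of_mem hvm]; simp
        refine ih _ k ?_ (hsort.sublist List.erase_sublist) ?_
        · rw [hlen]; simpa using hs
        · rw [hlen]; simpa using hk
      rw [pvLexPerms_cons, pvFG (pvGps (x :: t)) (x :: t) k [] hpw (by simp) hf,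
        List.nil_append]
      have hB := pvGenGo_eq (x :: t).length k (x :: t) [] le_rfl (by simpa using hsort)
        (by simp)
      simp only [List.nil_append] at hB
      show _ = pvGenGo (pvGen k) [] (x :: t)
      rw [hB]

-- ===== VERDICT (by name: the statement is the Claim_ definition above) =====
theorem knuth_L_algorithm_spec : Claim_equal_knuth_L_algorithm := by
  intro seq _
  unfold Spec_knuth_L_algorithm knuth_L_algorithm knuth_L_algorithm_alt
  by_cases hseq : seq.length = 0
  · rw [if_pos hseq]
    have hnil : seq = [] := List.length_eq_zero_iff.mp hseq
    subst hnil
    have hs : PySem.List.sorted ([] : List Int) (fun x => x) false = [] :=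
      (PySem.List.sorted_eq_nil_iff _ _ _).mpr rfl
    simp only [hs]
    rfl
  · rw [if_neg hseq]
    set s := PySem.List.sorted seq (fun x => x) false with hsdef
    have hsne : s ≠ [] := by
      intro hc
      exact hseq (by rw [(PySem.List.sorted_eq_nil_iff seq (fun x => x) false).mp hc]; rfl)
    have hsort : s.Pairwise (· ≤ ·) := PySem.List.sorted_pairwise seq _
    obtain ⟨h0, t0, hse⟩ := List.exists_cons_of_ne_nil hsne
    have hmain := pvMainch s.length (pvGps (s.filter (fun y => decide (h0 < y)))).length
      s h0 (Nat.le_succ _) le_rfl hsort (by rw [hse]; exact List.mem_cons_self)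
    have hchain : pvChains s (pvLexPerms s) := by
      have h1 := hmain.1
      rw [hse, List.erase_cons_head, pvRestPerms_head, ← hse] at h1
      exact h1
    have hflen : (pvLexPerms s).length ≤ Nat.factorial s.length + 1 :=
      le_trans (pvLexPerms_length_le s) (Nat.le_succ _)
    rw [pvLoop_of_chains hchain _ hflen]
    exact pvFold_eq s.length s (s.length / 2) le_rfl hsort (Nat.div_le_self _ _)
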